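-- pv_equiv track=rewrite | github.com/NEXUS-aisys/Nexus-AI-trading | strategies/stop_run_anticipation.py | _detect_iceberg_pattern
-- ===== SOURCE A (Python) =====
-- def has_min_length(sequence, minimum: int) -> bool:
--     """Return True when *sequence* has at least *minimum* elements."""
--     try:
--         return len(sequence) >= minimum
--     except TypeError:
--         return False
--
-- def _detect_iceberg_pattern(recent_fills):
--     """Detect potential iceberg orders"""
--     if not has_min_length(recent_fills, 3):
--         return False
--
--     # Iceberg: multiple small fills at same price
--     prices = [f['price'] for f in recent_fills]
--     sizes = [f['filled_qty'] for f in recent_fills]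
--
--     # Check if multiple fills at same price
--     from collections import Counter
--     price_counts = Counter(prices)
--     if max(price_counts.values()) >= 3:
--         # Multiple fills at same price indicates iceberg
--         return True
--
--     return False
-- ===== SOURCE B (Python) =====
-- def has_min_length(sequence, minimum: int) -> bool:
--     """Return True when *sequence* has at least *minimum* elements."""
--     try:
--         return len(sequence) >= minimum
--     except TypeError:
--         return False
--
-- def _detect_iceberg_pattern(recent_fills):
--     """Detect potential iceberg orders: some price repeated >= 3 times."""
--     if not has_min_length(recent_fills, 3):
--         return False
--     prices = sorted(f['price'] for f in recent_fills)
--     # after sorting, equal prices are adjacent: a price occurs >= 3 times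
--     # exactly when some element equals the one two positions later
--     return any(a == c for a, c in zip(prices, prices[2:]))
-- ===== Notes on version B (the rewrite author's own statement) =====
-- stated objective: alternative
-- what changed: Replaces the Counter-and-max tally with sort-then-scan: sort the prices and report True iff some element equals the one two positions later, which on a sorted list is exactly 'some price occurs at least 3 times'; the unused sizes list is dropped.
import Mathlib
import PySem

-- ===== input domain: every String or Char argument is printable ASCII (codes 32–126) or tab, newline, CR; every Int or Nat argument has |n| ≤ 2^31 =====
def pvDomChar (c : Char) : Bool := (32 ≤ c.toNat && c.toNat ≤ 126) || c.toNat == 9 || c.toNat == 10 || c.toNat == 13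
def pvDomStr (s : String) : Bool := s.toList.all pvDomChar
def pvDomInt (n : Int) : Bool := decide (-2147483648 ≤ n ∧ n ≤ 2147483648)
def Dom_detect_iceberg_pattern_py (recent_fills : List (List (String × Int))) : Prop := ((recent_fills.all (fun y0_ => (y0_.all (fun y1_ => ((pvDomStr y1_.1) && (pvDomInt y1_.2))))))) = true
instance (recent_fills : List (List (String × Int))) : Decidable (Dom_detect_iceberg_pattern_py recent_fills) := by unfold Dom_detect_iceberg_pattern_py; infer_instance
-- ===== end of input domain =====

-- B replaces A's Counter-and-max tally by sort-then-scan of adjacent-at-distance-2 equal prices (alternative algorithm, not claimed faster).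

-- ===== PORT A =====
def detect_iceberg_pattern_py (recent_fills : List (List (String × Int))) : Bool :=
  if recent_fills.length < 3 then false
  else
    let prices := recent_fills.map (fun f => (PySem.Dict.ofList f).getD "price" 0)
    let _sizes := recent_fills.map (fun f => (PySem.Dict.ofList f).getD "filled_qty" 0)
    let price_counts := PySem.Dict.counter prices
    match PySem.List.max? price_counts.values (fun v => v) with
    | some m => decide (3 ≤ m)
    | none => false

-- ===== PORT B =====
def detect_iceberg_pattern_py_alt (recent_fills : List (List (String × Int))) : Bool :=
  if recent_fills.length < 3 then false
  else
    let prices := PySem.List.sorted (recent_fills.map (fun f => (PySem.Dict.ofList f).getD "price" 0)) (fun x => x) false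
    (prices.zip (prices.drop 2)).any (fun p => p.1 == p.2)

-- ===== PRECONDITION & SPEC =====
-- Pre_ excludes exactly the inputs where Python A raises KeyError: ≥ 3 fills and some fill missing the 'price' or 'filled_qty' key.
def Pre_detect_iceberg_pattern_py (recent_fills : List (List (String × Int))) : Prop :=
  3 ≤ recent_fills.length →
    ∀ f ∈ recent_fills, (PySem.Dict.ofList f).contains "price" = true ∧ (PySem.Dict.ofList f).contains "filled_qty" = true
instance (recent_fills : List (List (String × Int))) : Decidable (Pre_detect_iceberg_pattern_py recent_fills) := by unfold Pre_detect_iceberg_pattern_py; infer_instance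
def pvWitness_detect_iceberg_pattern_py : (List (List (String × Int))) :=
  [[("price", 5), ("filled_qty", 1)], [("price", 5), ("filled_qty", 2)], [("price", 5), ("filled_qty", 1)]]


def Spec_detect_iceberg_pattern_py (recent_fills : List (List (String × Int))) (out : Bool) : Prop := out = detect_iceberg_pattern_py_alt recent_fills
instance (recent_fills : List (List (String × Int))) (out : Bool) : Decidable (Spec_detect_iceberg_pattern_py recent_fills out) := by unfold Spec_detect_iceberg_pattern_py; infer_instance

-- ===== CLAIM (what is proved, stated in full; the proofs are below) =====
def Claim_equal_detect_iceberg_pattern_py : Prop := ∀ (recent_fills : List (List (String × Int))), Dom_detect_iceberg_pattern_py recent_fills → Pre_detect_iceberg_pattern_py recent_fills → Spec_detect_iceberg_pattern_py recent_fills (detect_iceberg_pattern_py recent_fills)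

-- ===== LEMMAS AND PROOFS =====

-- A's Counter/max condition says: some price occurs at least 3 times.
lemma maxCount_iff (ps : List Int) (hne : ps ≠ []) :
    ((match PySem.List.max? (PySem.Dict.counter ps).values (fun v => v) with
      | some m => decide (3 ≤ m)
      | none => false) = true) ↔ ∃ x, 3 ≤ ps.count x := by
  have hnd := PySem.Dict.nodup_keys_counter (xs := ps)
  have hvals : (PySem.Dict.counter ps).values
      = (PySem.Set.ofList ps).map (fun k => ((ps.count k : Int))) := by
    rw [PySem.Dict.values_eq_map_keys _ hnd 0]
    rw [PySem.Dict.keys_counter]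
    exact List.map_congr_left (fun k _ => PySem.Dict.getD_counter ps k)
  obtain ⟨a, t, rfl⟩ : ∃ a t, ps = a :: t := by
    cases ps with
    | nil => exact absurd rfl hne
    | cons a t => exact ⟨a, t, rfl⟩
  cases hmax : PySem.List.max? (PySem.Dict.counter (a :: t)).values (fun v => v) with
  | none =>
    rw [PySem.List.max?_eq_none_iff] at hmax
    rw [hvals] at hmax
    simp only [List.map_eq_nil_iff] at hmax
    have : a ∈ PySem.Set.ofList (a :: t) := (PySem.Set.mem_ofList _ _).mpr (List.mem_cons_self)
    rw [hmax] at this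
    exact absurd this (List.not_mem_nil)
  | some m =>
    simp only [decide_eq_true_eq]
    constructor
    · intro h3
      have hm := PySem.List.max?_mem hmax
      rw [hvals] at hm
      obtain ⟨k, _, hk⟩ := List.mem_map.mp hm
      exact ⟨k, by rw [← hk] at h3; exact_mod_cast h3⟩
    · rintro ⟨x, hx⟩
      have hxmem : x ∈ (a :: t) := List.count_pos_iff.mp (by omega)
      have hv : ((( (a :: t).count x : Int))) ∈ (PySem.Dict.counter (a :: t)).values := by
        rw [hvals]
        exact List.mem_map.mpr ⟨x, (PySem.Set.mem_ofList _ _).mpr hxmem, rfl⟩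
      have := PySem.List.max?_isMax hmax _ hv
      have h3 : (3 : Int) ≤ ((a :: t).count x : Int) := by exact_mod_cast hx
      exact le_trans h3 this

-- B's scan condition says: some element equals the one two positions later.
lemma zip_any_iff (ps : List Int) :
    ((ps.zip (ps.drop 2)).any (fun p => p.1 == p.2) = true) ↔
      ∃ k, ∃ h : k + 2 < ps.length, ps[k] = ps[k + 2] := by
  rw [List.any_eq_true]
  constructor
  · rintro ⟨p, hp, he⟩
    obtain ⟨k, hk, hpk⟩ := List.mem_iff_getElem.mp hp
    have hklt : k + 2 < ps.length := by
      have := hk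
      simp only [List.length_zip, List.length_drop] at this
      omega
    refine ⟨k, hklt, ?_⟩
    have h1 : k < ps.length := by omega
    have h2 : k < (ps.drop 2).length := by simp [List.length_drop]; omega
    rw [List.getElem_zip] at hpk
    have hd : (ps.drop 2)[k] = ps[2 + k] := List.getElem_drop ..
    rw [← hpk] at he
    simp only [beq_iff_eq] at he
    rw [hd] at he
    simpa [Nat.add_comm] using he
  · rintro ⟨k, hk, he⟩
    have hkz : k < (ps.zip (ps.drop 2)).length := by
      simp [List.length_zip, List.length_drop]; omega
    refine ⟨(ps.zip (ps.drop 2))[k], List.getElem_mem hkz, ?_⟩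
    rw [List.getElem_zip]
    have hd : (ps.drop 2)[k]'(by simp [List.length_drop]; omega) = ps[2 + k]'(by omega) :=
      List.getElem_drop ..
    simp only [beq_iff_eq, hd]
    simpa [Nat.add_comm] using he

-- a sorted list whose lower bound x occurs in it must start with x
lemma head_eq_of_mem_of_lb (x : Int) (t : List Int) (hp : t.Pairwise (· ≤ ·))
    (hlb : ∀ y ∈ t, x ≤ y) (hx : x ∈ t) : ∃ t', t = x :: t' := by
  cases t with
  | nil => exact absurd hx (List.not_mem_nil)
  | cons b t' =>
    have hxb : x ≤ b := hlb b List.mem_cons_self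
    have hbx : b ≤ x := by
      rcases List.mem_cons.mp hx with h | h
      · exact le_of_eq h.symm
      · exact (List.pairwise_cons.mp hp).1 x h
    exact ⟨t', by rw [le_antisymm hbx hxb]⟩

-- on a sorted list, a value with count ≥ 3 yields three consecutive equal entries
lemma count3_to_triple (ps : List Int) (hs : ps.Pairwise (· ≤ ·)) (x : Int)
    (h3 : 3 ≤ ps.count x) : ∃ k, ∃ h : k + 2 < ps.length, ps[k] = ps[k + 2] := by
  induction ps with
  | nil => simp at h3
  | cons a t ih =>
    by_cases hax : a = x
    · subst hax
      have h2 : 2 ≤ t.count a := by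
        have hcc : (a :: t).count a = t.count a + 1 := List.count_cons_self
        omega
      have hlb : ∀ y ∈ t, a ≤ y := (List.pairwise_cons.mp hs).1
      have hpt : t.Pairwise (· ≤ ·) := (List.pairwise_cons.mp hs).2
      obtain ⟨t1, rfl⟩ := head_eq_of_mem_of_lb a t hpt hlb
        (List.count_pos_iff.mp (by omega))
      have h1 : 1 ≤ t1.count a := by
        have hcc : (a :: t1).count a = t1.count a + 1 := List.count_cons_self
        omega
      obtain ⟨t2, rfl⟩ := head_eq_of_mem_of_lb a t1 (List.pairwise_cons.mp hpt).2
        (List.pairwise_cons.mp hpt).1 (List.count_pos_iff.mp (by omega))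
      exact ⟨0, by simp, rfl⟩
    · have h3' : 3 ≤ t.count x := by
        rw [List.count_cons_of_ne hax] at h3
        exact h3
      obtain ⟨k, hk, he⟩ := ih (List.pairwise_cons.mp hs).2 h3'
      exact ⟨k + 1, by simp; omega, by simpa using he⟩

-- On a sorted list the two conditions coincide.
lemma sorted_triple_iff (ps : List Int) (hs : ps.Pairwise (· ≤ ·)) :
    (∃ k, ∃ h : k + 2 < ps.length, ps[k] = ps[k + 2]) ↔ ∃ x, 3 ≤ ps.count x := by
  constructor
  · rintro ⟨k, hk, he⟩
    refine ⟨ps[k], ?_⟩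
    have hmono := List.pairwise_iff_getElem.mp hs
    have e1 : ps[k + 1]'(by omega) = ps[k] := by
      have hle1 : ps[k] ≤ ps[k + 1]'(by omega) := hmono k (k + 1) (by omega) (by omega) (by omega)
      have hle2 : ps[k + 1]'(by omega) ≤ ps[k + 2] := hmono (k + 1) (k + 2) (by omega) hk (by omega)
      rw [← he] at hle2
      exact le_antisymm hle2 hle1
    have hdrop : ps.drop k = ps[k] :: ps[k + 1]'(by omega) :: ps[k + 2] :: ps.drop (k + 3) := by
      rw [List.drop_eq_getElem_cons (by omega : k < ps.length)]
      rw [List.drop_eq_getElem_cons (by omega : k + 1 < ps.length)]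
      rw [List.drop_eq_getElem_cons (by omega : k + 2 < ps.length)]
    have hsub : (ps.drop k).count ps[k] ≤ ps.count ps[k] :=
      (List.drop_sublist k ps).count_le _
    rw [hdrop, e1, ← he] at hsub
    simp [List.count_cons_self] at hsub
    omega
  · rintro ⟨x, hx⟩
    exact count3_to_triple ps hs x hx

-- ===== VERDICT (by name: the statement is the Claim_ definition above) =====
theorem detect_iceberg_pattern_py_spec : Claim_equal_detect_iceberg_pattern_py := by
  intro rf hdom hpre
  unfold Spec_detect_iceberg_pattern_py detect_iceberg_pattern_py detect_iceberg_pattern_py_alt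
  by_cases hlen : rf.length < 3
  · simp [hlen]
  · simp only [hlen, if_false]
    set ps := rf.map (fun f => (PySem.Dict.ofList f).getD "price" 0) with hps
    set sp := PySem.List.sorted ps (fun x => x) false with hsp
    have hperm : sp.Perm ps := PySem.List.sorted_perm ..
    have hpw : sp.Pairwise (· ≤ ·) := by
      have := PySem.List.sorted_pairwise (xs := ps) (key := fun x => x)
      simpa using this
    have hne : ps ≠ [] := by
      intro h
      rw [hps] at h
      simp only [List.map_eq_nil_iff] at h
      rw [h] at hlen
      simp at hlen
    rw [Bool.eq_iff_iff]
    rw [maxCount_iff ps hne, zip_any_iff sp, sorted_triple_iff sp hpw]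
    constructor
    · rintro ⟨x, hx⟩
      exact ⟨x, by rw [hperm.count_eq]; exact hx⟩
    · rintro ⟨x, hx⟩
      exact ⟨x, by rw [← hperm.count_eq]; exact hx⟩
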